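-- pv_equiv track=rewrite | github.com/imewei/pyXRayLabTool | scripts/test_documentation_integration.py | _validate_import_path
-- ===== SOURCE A (Python) =====
-- def _validate_import_path(import_path: str) -> bool:
--     """Validate that an import path exists."""
--     # Check against known valid imports
--     valid_imports = [
--         "xraylabtool",
--         "xraylabtool.calculators",
--         "xraylabtool.data_handling",
--         "xraylabtool.interfaces",
--         "xraylabtool.io",
--         "xraylabtool.utils",
--         "xraylabtool.validation",
--     ]
--
--     return any(import_path.startswith(valid) for valid in valid_imports)
-- ===== SOURCE B (Python) =====
-- def _validate_import_path(import_path: str) -> bool: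
--     """Validate that an import path exists."""
--     # Every valid import is "xraylabtool" or a submodule of it, and
--     # "xraylabtool" is a prefix of all of them, so one check suffices.
--     return import_path.startswith("xraylabtool")
-- ===== Notes on version B (the rewrite author's own statement) =====
-- stated objective: simpler
-- what changed: The any()-loop over seven hard-coded prefixes collapses to a single startswith check, since "xraylabtool" is a prefix of every entry in the list.
import Mathlib
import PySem

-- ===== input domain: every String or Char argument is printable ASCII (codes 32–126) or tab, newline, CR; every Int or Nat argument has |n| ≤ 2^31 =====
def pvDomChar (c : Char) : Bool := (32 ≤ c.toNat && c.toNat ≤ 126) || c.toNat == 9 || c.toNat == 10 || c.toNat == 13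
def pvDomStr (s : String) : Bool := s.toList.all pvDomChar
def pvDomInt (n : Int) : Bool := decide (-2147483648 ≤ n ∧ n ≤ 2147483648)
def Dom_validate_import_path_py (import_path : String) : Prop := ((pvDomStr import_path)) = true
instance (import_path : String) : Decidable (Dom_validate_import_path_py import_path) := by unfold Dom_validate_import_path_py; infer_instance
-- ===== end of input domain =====

-- B replaces A's any() over a constant prefix list by one startswith check ("xraylabtool"
-- is a prefix of every list entry); objective: simpler.

-- ===== PORT A =====
def validate_import_path_py (import_path : String) : Bool :=
  let valid_imports : List String :=
    [ "xraylabtool",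
      "xraylabtool.calculators",
      "xraylabtool.data_handling",
      "xraylabtool.interfaces",
      "xraylabtool.io",
      "xraylabtool.utils",
      "xraylabtool.validation" ]
  valid_imports.any (fun valid => PySem.Str.startswith import_path valid)

-- ===== PORT B =====
def validate_import_path_py_alt (import_path : String) : Bool :=
  PySem.Str.startswith import_path "xraylabtool"

-- ===== PRECONDITION & SPEC =====
def Spec_validate_import_path_py (import_path : String) (out : Bool) : Prop := out = validate_import_path_py_alt import_path
instance (import_path : String) (out : Bool) : Decidable (Spec_validate_import_path_py import_path out) := by unfold Spec_validate_import_path_py; infer_instance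

-- ===== CLAIM (what is proved, stated in full; the proofs are below) =====
def Claim_equal_validate_import_path_py : Prop := ∀ (import_path : String), Dom_validate_import_path_py import_path → Spec_validate_import_path_py import_path (validate_import_path_py import_path)

-- ===== LEMMAS AND PROOFS =====

-- A longer valid import starting the string implies the short one does:
-- startswith s (p ++ t) → startswith s p.
theorem startswith_of_startswith_append (s p t : String)
    (h : PySem.Str.startswith s (p ++ t) = true) :
    PySem.Str.startswith s p = true := by
  simp only [PySem.Str.startswith_eq] at h ⊢
  rw [PySem.Chars.startswith_iff] at h ⊢
  have hp : p.toList <+: (p ++ t).toList := by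
    simp [List.prefix_append]
  exact hp.trans h

-- each long disjunct is absorbed by the short one: (a || long) = a when long → a
theorem or_absorb_long (s p t : String) (b : Bool) :
    (PySem.Str.startswith s p || (PySem.Str.startswith s (p ++ t) || b))
      = (PySem.Str.startswith s p || b) := by
  cases hl : PySem.Str.startswith s (p ++ t) with
  | false => simp
  | true =>
      have h := startswith_of_startswith_append s p t hl
      simp only [PySem.Str.startswith_eq] at h
      simp [h]

-- ===== VERDICT (by name: the statement is the Claim_ definition above) =====
theorem validate_import_path_py_spec : Claim_equal_validate_import_path_py := by
  intro s _
  unfold Spec_validate_import_path_py validate_import_path_py validate_import_path_py_alt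
  simp only [List.any_cons, List.any_nil]
  have h1 := or_absorb_long s "xraylabtool" ".calculators"
  have h2 := or_absorb_long s "xraylabtool" ".data_handling"
  have h3 := or_absorb_long s "xraylabtool" ".interfaces"
  have h4 := or_absorb_long s "xraylabtool" ".io"
  have h5 := or_absorb_long s "xraylabtool" ".utils"
  have h6 := or_absorb_long s "xraylabtool" ".validation"
  simp only [PySem.Str.startswith_eq] at h1 h2 h3 h4 h5 h6 ⊢
  rw [show ("xraylabtool.calculators" : String) = "xraylabtool" ++ ".calculators" from rfl,
      show ("xraylabtool.data_handling" : String) = "xraylabtool" ++ ".data_handling" from rfl,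
      show ("xraylabtool.interfaces" : String) = "xraylabtool" ++ ".interfaces" from rfl,
      show ("xraylabtool.io" : String) = "xraylabtool" ++ ".io" from rfl,
      show ("xraylabtool.utils" : String) = "xraylabtool" ++ ".utils" from rfl,
      show ("xraylabtool.validation" : String) = "xraylabtool" ++ ".validation" from rfl,
      h1, h2, h3, h4, h5, h6]
  simp
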